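-- pv_equiv track=rewrite | github.com/iamsamiofficial/Codeforces | maths/90.D. GCD-sequence.py | calculate
-- ===== SOURCE A (Python) =====
-- import math
--
-- def check(i,l):
--     store = []
--     g = []
--     for j in range(len(l)):
--         if i!=j:
--             store.append(l[j])
--     for i in range(len(store)-1):
--         g.append(math.gcd(store[i],store[i+1]))
--     if g == sorted(g):
--         return True
--     else:
--         False
--
-- def calculate(n,l):
--     a = []
--     for i in range(n-1):
--         a.append(math.gcd(l[i],l[i+1]))
--
--     if a == sorted(a):
--         return True
--     else:
--         for i in range(n-1):
--             if a[i]>a[i+1]: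
--                 d = check(i,l)
--                 if d:
--                     return True
--                 e = check(i+1,l)
--                 if e:
--                     return True
--                 f = check(i+2,l)
--                 if f:
--                     return True
--                 else:
--                     return False
-- ===== SOURCE B (Python) =====
-- import math
--
-- def _nondec(xs):
--     return all(x <= y for x, y in zip(xs, xs[1:]))
--
-- def _removal_ok(l, k):
--     rest = l[:k] + l[k + 1:]
--     return _nondec([math.gcd(x, y) for x, y in zip(rest, rest[1:])])
--
-- def calculate(n, l):
--     gs = [math.gcd(x, y) for x, y in zip(l, l[1:])]
--     if _nondec(gs[:max(n - 1, 0)]):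
--         return True
--     return any(_removal_ok(l, k) for k in range(len(l)))
-- ===== Notes on version B (the rewrite author's own statement) =====
-- stated objective: alternative
-- what changed: B drops A's find-the-first-descent-and-try-removing-i,i+1,i+2 control flow entirely: after a linear non-decreasing scan of the gcd prefix it simply brute-forces every removal position k in range(len(l)) and tests the rebuilt gcd list with a linear scan; this is equivalent because a removal can only repair the sequence if it touches the three elements of the first descent, which the exhaustive search covers.
import Mathlib
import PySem

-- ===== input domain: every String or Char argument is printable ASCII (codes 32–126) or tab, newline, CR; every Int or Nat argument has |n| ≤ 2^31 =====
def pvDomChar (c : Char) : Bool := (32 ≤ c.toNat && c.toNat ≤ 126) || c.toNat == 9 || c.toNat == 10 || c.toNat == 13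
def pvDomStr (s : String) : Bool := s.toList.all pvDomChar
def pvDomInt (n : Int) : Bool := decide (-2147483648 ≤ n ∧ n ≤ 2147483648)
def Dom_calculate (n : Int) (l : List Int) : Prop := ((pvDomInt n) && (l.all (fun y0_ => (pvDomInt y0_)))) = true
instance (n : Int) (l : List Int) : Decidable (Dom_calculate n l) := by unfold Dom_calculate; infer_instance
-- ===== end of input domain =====

-- B drops A's find-first-descent-and-try-removing-i,i+1,i+2 control flow: it brute-forces every
-- removal position with a linear monotonicity scan; return values agree on Pre_.

-- ===== PORT A =====
-- helper `check(i, l)`: Python returns True or falls through to None; inside `calculate`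
-- the result is only used for truthiness, so it is ported as Bool (None ↦ false).
def checkA (i : Int) (l : List Int) : Bool :=
  let store := (PySem.List.pyRange 0 (l.length : Int) 1).foldl
      (fun st j => if i ≠ j then st ++ [PySem.List.pyGetD l j 0] else st) []
  let g := (PySem.List.pyRange 0 ((store.length : Int) - 1) 1).foldl
      (fun g j => g ++ [((PySem.List.pyGetD store j 0).gcd (PySem.List.pyGetD store (j+1) 0) : Int)]) []
  g = PySem.List.sorted g (fun x => x) false

-- the `for i in range(n-1): if a[i] > a[i+1]: …` loop with its early returns;
-- falling off the end (unreachable when a is unsorted) yields false.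
def loopA (a : List Int) (l : List Int) : List Int → Bool
  | [] => false
  | i :: rest =>
    if PySem.List.pyGetD a i 0 > PySem.List.pyGetD a (i+1) 0 then
      if checkA i l then true
      else if checkA (i+1) l then true
      else if checkA (i+2) l then true
      else false
    else loopA a l rest

def calculate (n : Int) (l : List Int) : Bool :=
  let a := (PySem.List.pyRange 0 (n - 1) 1).foldl
      (fun acc i => acc ++ [((PySem.List.pyGetD l i 0).gcd (PySem.List.pyGetD l (i+1) 0) : Int)]) []
  if a = PySem.List.sorted a (fun x => x) false then true
  else loopA a l (PySem.List.pyRange 0 (n - 1) 1)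

-- ===== PORT B =====
-- _nondec(xs) = all(x <= y for x, y in zip(xs, xs[1:]))
def nondecB (xs : List Int) : Bool :=
  (List.zip xs (PySem.List.slice xs (some 1) none)).all (fun p => decide (p.1 ≤ p.2))

-- [math.gcd(x, y) for x, y in zip(xs, xs[1:])]
def adjGcdB (xs : List Int) : List Int :=
  (List.zip xs (PySem.List.slice xs (some 1) none)).map (fun p => (p.1.gcd p.2 : Int))

-- _removal_ok(l, k): rest = l[:k] + l[k+1:]; scan its adjacent gcds
def removalOkB (l : List Int) (k : Int) : Bool :=
  let rest := PySem.List.slice l none (some k) ++ PySem.List.slice l (some (k + 1)) none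
  nondecB (adjGcdB rest)

def calculate_alt (n : Int) (l : List Int) : Bool :=
  if nondecB (PySem.List.slice (adjGcdB l) none (some (max (n - 1) 0))) then true
  else (PySem.List.pyRange 0 (l.length : Int) 1).any (fun k => removalOkB l k)

-- ===== PRECONDITION & SPEC =====
-- A indexes l[i] and l[i+1] for i in range(n-1): it raises IndexError exactly when
-- n > len(l) and 2 ≤ n (for n ≤ 1 the loop body never runs, so nothing is indexed).
def Pre_calculate (n : Int) (l : List Int) : Prop := n ≤ (l.length : Int) ∨ n ≤ 1
instance (n : Int) (l : List Int) : Decidable (Pre_calculate n l) := by unfold Pre_calculate; infer_instance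
def pvWitness_calculate : Int × List Int := (4, [6, 2, 3, 12])

def Spec_calculate (n : Int) (l : List Int) (out : Bool) : Prop := out = calculate_alt n l
instance (n : Int) (l : List Int) (out : Bool) : Decidable (Spec_calculate n l out) := by unfold Spec_calculate; infer_instance

-- ===== CLAIM (what is proved, stated in full; the proofs are below) =====
def Claim_equal_calculate : Prop := ∀ (n : Int) (l : List Int), Dom_calculate n l → Pre_calculate n l → Spec_calculate n l (calculate n l)

-- ===== LEMMAS AND PROOFS =====

-- canonical adjacent-gcd list used by the proofs
def adjG (xs : List Int) : List Int :=
  List.zipWith (fun x y => ((Int.gcd x y : Nat) : Int)) xs xs.tail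

-- removal test over Nat indices, the common form both sides reduce to
def remOkP (l : List Int) (k : Nat) : Bool :=
  nondecB (adjGcdB (l.take k ++ l.drop (k+1)))

theorem adjGcdB_eq_adjG (xs : List Int) : adjGcdB xs = adjG xs := by
  simp [adjGcdB, adjG, PySem.List.slice_from_one, List.zip, List.map_zipWith]

theorem length_adjG (xs : List Int) : (adjG xs).length = xs.length - 1 := by
  simp [adjG]

theorem adjG_getD (xs : List Int) (j : Nat) (h : j + 1 < xs.length) :
    (adjG xs).getD j 0 = ((Int.gcd (xs.getD j 0) (xs.getD (j+1) 0) : Nat) : Int) := by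
  have hj : j < (adjG xs).length := by rw [length_adjG]; omega
  have h1 : j < xs.tail.length := by simp [List.length_tail]; omega
  rw [List.getD_eq_getElem _ 0 hj, List.getD_eq_getElem xs 0 (by omega : j < xs.length),
    List.getD_eq_getElem xs 0 h]
  simp [adjG, List.getElem_zipWith, List.getElem_tail]

theorem nondecB_cons_cons (x y : Int) (t : List Int) :
    nondecB (x :: y :: t) = (decide (x ≤ y) && nondecB (y :: t)) := by
  simp [nondecB, PySem.List.slice_from_one]

theorem pw_cons_cons (x y : Int) (t : List Int) :
    (x :: y :: t).Pairwise (· ≤ ·) ↔ x ≤ y ∧ (y :: t).Pairwise (· ≤ ·) := by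
  constructor
  · intro h
    rcases List.pairwise_cons.1 h with ⟨hx, ht⟩
    exact ⟨hx y (by simp), ht⟩
  · rintro ⟨hxy, ht⟩
    refine List.pairwise_cons.2 ⟨?_, ht⟩
    intro z hz
    rcases List.mem_cons.1 hz with rfl | hz'
    · exact hxy
    · exact le_trans hxy ((List.pairwise_cons.1 ht).1 z hz')

theorem nondecB_iff_pairwise (xs : List Int) :
    nondecB xs = true ↔ xs.Pairwise (· ≤ ·) := by
  induction xs with
  | nil => simp [nondecB]
  | cons x t ih =>
    cases t with
    | nil => simp [nondecB, PySem.List.slice_from_one]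
    | cons y t' =>
      rw [nondecB_cons_cons, pw_cons_cons]
      simp only [Bool.and_eq_true, decide_eq_true_eq, ih]

-- Python's `g == sorted(g)` is exactly the linear non-decreasing scan
theorem sortedTest_eq_nondecB (g : List Int) :
    (decide (g = PySem.List.sorted g (fun x => x) false)) = nondecB g := by
  by_cases hp : g.Pairwise (· ≤ ·)
  · have h1 : PySem.List.sorted g (fun x => x) false = g :=
      PySem.List.sorted_eq_self_of_pairwise g _ hp
    have h2 : nondecB g = true := (nondecB_iff_pairwise g).2 hp
    simp [h1, h2]
  · have h1 : g ≠ PySem.List.sorted g (fun x => x) false := by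
      intro h
      exact hp (by rw [h]; exact PySem.List.sorted_pairwise g _)
    have h2 : nondecB g = false := by
      cases hn : nondecB g
      · rfl
      · exact absurd ((nondecB_iff_pairwise g).1 hn) hp
    simp [h1, h2]

theorem nondecB_false_exists (xs : List Int) (h : nondecB xs = false) :
    ∃ j : Nat, j + 1 < xs.length ∧ xs.getD (j+1) 0 < xs.getD j 0 := by
  induction xs with
  | nil => simp [nondecB] at h
  | cons x t ih =>
    cases t with
    | nil => simp [nondecB, PySem.List.slice_from_one] at h
    | cons y t' =>
      rw [nondecB_cons_cons] at h
      by_cases hxy : x ≤ y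
      · have h' : nondecB (y :: t') = false := by
          cases hn : nondecB (y :: t')
          · rfl
          · simp [hn, hxy] at h
        rcases ih h' with ⟨j, hj, hlt⟩
        exact ⟨j + 1, by simpa using Nat.succ_lt_succ hj, by simpa using hlt⟩
      · exact ⟨0, by simp, by simpa using not_le.mp hxy⟩

-- a descent anywhere makes the scan fail
theorem nondecB_false_of_descent (xs : List Int) (j : Nat)
    (hj : j + 1 < xs.length) (h : xs.getD (j+1) 0 < xs.getD j 0) :
    nondecB xs = false := by
  cases hn : nondecB xs
  · rfl
  · exfalso
    have hp := (nondecB_iff_pairwise xs).1 hn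
    have := List.pairwise_iff_getElem.1 hp j (j+1) (by omega) hj (by omega)
    rw [List.getD_eq_getElem xs 0 (by omega : j < xs.length), List.getD_eq_getElem xs 0 hj] at h
    omega

-- building the adjacent-gcd list by an index loop
theorem foldl_adj (m : Nat) (xs : List Int) (hm : m < xs.length) :
    (PySem.List.pyRange 0 (m : Int) 1).foldl
      (fun acc i => acc ++ [((PySem.List.pyGetD xs i 0).gcd (PySem.List.pyGetD xs (i+1) 0) : Int)]) []
    = (adjG xs).take m := by
  induction m with
  | zero => simp [PySem.List.pyRange_one_eq_nil]
  | succ k ih =>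
    have hk : k < xs.length := Nat.lt_of_succ_lt hm
    have hcast : ((k + 1 : Nat) : Int) = (k : Int) + 1 := by push_cast; ring
    have hsplit : PySem.List.pyRange 0 ((k + 1 : Nat) : Int) 1
        = PySem.List.pyRange 0 (k : Int) 1 ++ [(k : Int)] := by
      rw [hcast]; exact PySem.List.pyRange_one_succ_right (by positivity)
    rw [hsplit, List.foldl_append, ih hk]
    have hk' : k < (adjG xs).length := by rw [length_adjG]; omega
    have hget : (adjG xs)[k] = ((Int.gcd (xs.getD k 0) (xs.getD (k+1) 0) : Nat) : Int) := by
      have := adjG_getD xs k hm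
      rwa [List.getD_eq_getElem _ 0 hk'] at this
    have htake : (adjG xs).take (k + 1) = (adjG xs).take k ++ [(adjG xs)[k]] := by
      rw [List.take_add_one, List.getElem?_eq_getElem hk']; rfl
    rw [htake, hget, List.foldl_cons, List.foldl_nil,
      show ((k : Int) + 1) = ((k + 1 : Nat) : Int) by push_cast; ring,
      PySem.List.pyGetD_natCast, PySem.List.pyGetD_natCast]

theorem map_getD_range (t : List Int) :
    (List.range t.length).map (fun j => t.getD j 0) = t := by
  apply List.ext_getElem
  · simp
  · intro i h1 h2
    simp [List.getElem?_eq_getElem h2]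

-- removing one index by filtering an index loop = take K ++ drop (K+1)
theorem filter_range_erase (l : List Int) (K : Nat) :
    ((List.range l.length).filter (fun j => decide (K ≠ j))).map (fun j => l.getD j 0)
      = l.take K ++ l.drop (K+1) := by
  induction l generalizing K with
  | nil => simp
  | cons x t ih =>
    have hr : List.range (x :: t).length = 0 :: (List.range t.length).map Nat.succ := by
      simp [List.range_succ_eq_map]
    rw [hr]
    cases K with
    | zero =>
      have hfilt : ((0 :: (List.range t.length).map Nat.succ).filter (fun j => decide ((0:Nat) ≠ j)))
          = (List.range t.length).map Nat.succ := by
        rw [List.filter_cons]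
        have h0 : (decide ((0:Nat) ≠ 0)) = false := by simp
        rw [h0]
        simp only [Bool.false_eq_true, if_false]
        apply List.filter_eq_self.2
        intro a ha
        rcases List.mem_map.1 ha with ⟨b, _, rfl⟩
        simp
      rw [hfilt, List.map_map]
      have : ((fun j => (x :: t).getD j 0) ∘ Nat.succ) = fun j => t.getD j 0 := by
        funext j; simp
      rw [this, map_getD_range]
      simp
    | succ K' =>
      simp only [List.filter_cons, List.filter_map]
      have hpred : ((fun j => decide (K' + 1 ≠ j)) ∘ Nat.succ) = fun j => decide (K' ≠ j) := by
        funext j; simp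
      have hne : (decide (K' + 1 ≠ 0)) = true := by simp
      rw [hpred]
      simp only [hne, if_true]
      rw [List.map_cons, List.map_map]
      have hcomp : ((fun j => (x :: t).getD j 0) ∘ Nat.succ) = fun j => t.getD j 0 := by
        funext j; simp
      rw [hcomp, ih K']
      simp

-- A's index-removal loop in check = slice concatenation
theorem store_eq (l : List Int) (K : Nat) :
    ((PySem.List.pyRange 0 ((l.length : Nat) : Int) 1).foldl
      (fun st j => if (K : Int) ≠ j then st ++ [PySem.List.pyGetD l j 0] else st) [])
    = l.take K ++ l.drop (K+1) := by
  have hfun : (fun (st : List Int) (j : Int) => if (K : Int) ≠ j then st ++ [PySem.List.pyGetD l j 0] else st)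
      = fun st j => if (fun j => decide ((K : Int) ≠ j)) j = true then st ++ [PySem.List.pyGetD l j 0] else st := by
    funext st j; simp
  rw [hfun, PySem.List.foldl_append_if]
  rw [PySem.List.pyRange_zero_natCast, List.filter_map, List.map_map]
  have hpred : ((fun j => decide ((K : Int) ≠ j)) ∘ fun k : Nat => (k : Int)) = fun j => decide (K ≠ j) := by
    funext j; simp
  have hf : ((fun j => PySem.List.pyGetD l j 0) ∘ fun k : Nat => (k : Int)) = fun j : Nat => l.getD j 0 := by
    funext j; simp
  rw [hpred, hf, filter_range_erase]
  simp

-- check(K, l) = the removal test at K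
theorem checkA_eq (l : List Int) (K : Nat) :
    checkA (K : Int) l = remOkP l K := by
  have hfold := store_eq l K
  unfold remOkP
  cases hcr : l.take K ++ l.drop (K+1) with
  | nil =>
    rw [hcr] at hfold
    simp only [checkA, hfold]
    simp [PySem.List.pyRange_one_eq_nil, adjGcdB, nondecB, PySem.List.sorted_eq_nil_iff]
  | cons z zs =>
    rw [hcr] at hfold
    simp only [checkA, hfold]
    rw [adjGcdB_eq_adjG]
    have hlen : (((z :: zs).length : Nat) : Int) - 1 = ((zs.length : Nat) : Int) := by
      push_cast [List.length_cons]; ring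
    rw [hlen, foldl_adj zs.length (z :: zs) (by simp),
      List.take_of_length_le (by rw [length_adjG]; simp)]
    exact sortedTest_eq_nondecB _

-- B's removal test at a Nat index = remOkP
theorem removalOkB_natCast (l : List Int) (k : Nat) :
    removalOkB l (k : Int) = remOkP l k := by
  unfold removalOkB remOkP
  rw [show ((k : Int) + 1) = ((k + 1 : Nat) : Int) by push_cast; ring,
    PySem.List.slice_to_natCast, PySem.List.slice_from_natCast]

-- the early-return descent loop, as a find? over its index range
theorem loopA_eq_find (a l : List Int) (xs : List Int) :
    loopA a l xs =
      (match xs.find? (fun j => decide (PySem.List.pyGetD a j 0 > PySem.List.pyGetD a (j+1) 0)) with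
       | some i => if checkA i l then true else if checkA (i+1) l then true
                   else if checkA (i+2) l then true else false
       | none => false) := by
  induction xs with
  | nil => simp [loopA]
  | cons i rest ih =>
    by_cases h : PySem.List.pyGetD a i 0 > PySem.List.pyGetD a (i+1) 0
    · simp [loopA, h, List.find?_cons_of_pos]
    · rw [List.find?_cons_of_neg (by simpa using h)]
      simp [loopA, h, ih]

-- element access in the list with index k removed
theorem rest_getD (l : List Int) (k p : Nat) (hk : k < l.length) (hp : p + 1 < l.length) :
    (l.take k ++ l.drop (k+1)).getD p 0 = if p < k then l.getD p 0 else l.getD (p+1) 0 := by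
  have htl : (l.take k).length = k := by rw [List.length_take]; omega
  have hpr : p < (l.take k ++ l.drop (k+1)).length := by
    rw [List.length_append, htl, List.length_drop]; omega
  rw [List.getD_eq_getElem _ 0 hpr]
  by_cases hpk : p < k
  · rw [List.getElem_append_left (by omega), List.getElem_take,
      List.getD_eq_getElem l 0 (by omega)]
    simp [hpk]
  · rw [List.getElem_append_right (by omega), List.getElem_drop,
      List.getD_eq_getElem l 0 hp]
    simp only [if_neg hpk, htl]
    congr 1
    omega

-- removing an element away from a descent of the gcd list leaves a descent
theorem descent_survive (l : List Int) (i k : Nat)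
    (hk : k < l.length) (hi2 : i + 2 < l.length)
    (h0 : k ≠ i) (h1 : k ≠ i + 1) (h2 : k ≠ i + 2)
    (hd : (adjG l).getD (i+1) 0 < (adjG l).getD i 0) :
    remOkP l k = false := by
  unfold remOkP
  rw [adjGcdB_eq_adjG]
  have hrl : (l.take k ++ l.drop (k+1)).length = l.length - 1 := by
    rw [List.length_append, List.length_take, List.length_drop]; omega
  rw [adjG_getD l i (by omega), adjG_getD l (i+1) hi2] at hd
  by_cases hki : k < i
  · -- descent survives at index i-1 of the new gcd list
    obtain ⟨j, rfl⟩ : ∃ j, i = j + 1 := ⟨i - 1, by omega⟩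
    apply nondecB_false_of_descent _ j
    · rw [length_adjG, hrl]; omega
    · rw [adjG_getD _ j (by omega), adjG_getD _ (j+1) (by omega),
        rest_getD l k j hk (by omega), rest_getD l k (j+1) hk (by omega),
        rest_getD l k (j+2) hk (by omega),
        if_neg (by omega), if_neg (by omega), if_neg (by omega)]
      exact hd
  · -- k ≥ i + 3: descent survives at index i
    have hki3 : i + 3 ≤ k := by omega
    apply nondecB_false_of_descent _ i
    · rw [length_adjG, hrl]; omega
    · rw [adjG_getD _ i (by omega), adjG_getD _ (i+1) (by omega),
        rest_getD l k i hk (by omega), rest_getD l k (i+1) hk (by omega),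
        rest_getD l k (i+2) hk (by omega),
        if_pos (by omega), if_pos (by omega), if_pos (by omega)]
      exact hd

-- getD of a take prefix
theorem getD_take_eq (xs : List Int) (m j : Nat) (hj : j < m) (hjx : j < xs.length) :
    (xs.take m).getD j 0 = xs.getD j 0 := by
  have hjt : j < (xs.take m).length := by rw [List.length_take]; omega
  rw [List.getD_eq_getElem _ 0 hjt, List.getD_eq_getElem xs 0 hjx, List.getElem_take]

-- ===== VERDICT =====
theorem calculate_spec : Claim_equal_calculate := by
  intro n l _hdom hpre
  unfold Pre_calculate at hpre
  unfold Spec_calculate calculate calculate_alt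
  set m : Nat := (n - 1).toNat with hm
  have ha_eq : (PySem.List.pyRange 0 (n - 1) 1).foldl
      (fun acc i => acc ++ [((PySem.List.pyGetD l i 0).gcd (PySem.List.pyGetD l (i+1) 0) : Int)]) []
      = (adjG l).take m := by
    by_cases hn : 2 ≤ n
    · have hnl : n ≤ (l.length : Int) := by
        rcases hpre with h | h
        · exact h
        · omega
      have hml : m < l.length := by omega
      rw [show (n - 1) = ((m : Nat) : Int) by omega]
      exact foldl_adj m l hml
    · rw [PySem.List.pyRange_one_eq_nil (by omega : n - 1 ≤ 0),
        show m = 0 by omega]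
      simp
  have hb_eq : PySem.List.slice (adjGcdB l) none (some (max (n - 1) 0)) = (adjG l).take m := by
    rw [adjGcdB_eq_adjG, show max (n - 1) 0 = ((m : Nat) : Int) by
      rw [hm]; exact (Int.toNat_eq_max _).symm, PySem.List.slice_to_natCast]
  rw [ha_eq, hb_eq]
  set a : List Int := (adjG l).take m with hadef
  by_cases hp : a.Pairwise (· ≤ ·)
  · have h1 : PySem.List.sorted a (fun x => x) false = a :=
      PySem.List.sorted_eq_self_of_pairwise a _ hp
    have h2 : nondecB a = true := (nondecB_iff_pairwise a).2 hp
    rw [if_pos (by rw [h1]), if_pos h2]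
  · have hA1 : ¬ (a = PySem.List.sorted a (fun x => x) false) := by
      intro h
      exact hp (by rw [h]; exact PySem.List.sorted_pairwise a _)
    have h2 : nondecB a = false := by
      cases hn : nondecB a
      · rfl
      · exact absurd ((nondecB_iff_pairwise a).1 hn) hp
    rw [if_neg hA1, if_neg (by simp [h2])]
    rcases nondecB_false_exists a h2 with ⟨j, hj1, hj2⟩
    have hlen_le : a.length ≤ m := by rw [hadef]; simp
    have hm2 : 2 ≤ m := by omega
    have hnl : n ≤ (l.length : Int) := by
      rcases hpre with h | h
      · exact h
      · omega
    have hlena : a.length = m := by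
      rw [hadef, List.length_take, length_adjG]
      omega
    have hadjlen : m ≤ (adjG l).length := by rw [length_adjG]; omega
    have hml : m < l.length := by omega
    -- A's loop: find? over range(n-1); the last index (out-of-range probe) is never consulted
    rw [show n - 1 = ((m : Nat) : Int) by omega, loopA_eq_find]
    have hsplit : PySem.List.pyRange 0 ((m : Nat) : Int) 1
        = PySem.List.pyRange 0 ((m - 1 : Nat) : Int) 1 ++ [((m - 1 : Nat) : Int)] := by
      rw [show ((m : Nat) : Int) = ((m - 1 : Nat) : Int) + 1 by omega]
      exact PySem.List.pyRange_one_succ_right (by positivity)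
    rw [hsplit, List.find?_append]
    have hexists : ∃ x ∈ PySem.List.pyRange 0 ((m - 1 : Nat) : Int) 1,
        (fun j => decide (PySem.List.pyGetD a j 0 > PySem.List.pyGetD a (j+1) 0)) x = true := by
      refine ⟨(j : Int), ?_, ?_⟩
      · rw [PySem.List.mem_pyRange_one]
        constructor
        · positivity
        · exact_mod_cast (by omega : j < m - 1)
      · simp only [show ((j : Int) + 1) = ((j + 1 : Nat) : Int) by push_cast; ring,
          PySem.List.pyGetD_natCast, gt_iff_lt, decide_eq_true_eq]
        exact hj2
    obtain ⟨i, hifind⟩ := Option.isSome_iff_exists.1 (List.find?_isSome.2 hexists)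
    rw [hifind, Option.some_or]
    have him := List.mem_of_find?_eq_some hifind
    have hipred := List.find?_some hifind
    have hi0 : 0 ≤ i := (PySem.List.mem_pyRange_one.1 him).1
    have hiub : i < ((m - 1 : Nat) : Int) := (PySem.List.mem_pyRange_one.1 him).2
    set K : Nat := i.toNat with hK
    have hiK : i = ((K : Nat) : Int) := by omega
    have hK1 : K + 1 < m := by omega
    -- the found index is a genuine descent of the gcd list
    have hdescA : a.getD (K+1) 0 < a.getD K 0 := by
      rw [hiK] at hipred
      have h' := of_decide_eq_true hipred
      rwa [show (((K : Nat) : Int) + 1) = ((K + 1 : Nat) : Int) by push_cast; ring,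
        PySem.List.pyGetD_natCast, PySem.List.pyGetD_natCast] at h'
    have hdesc : (adjG l).getD (K+1) 0 < (adjG l).getD K 0 := by
      rw [hadef] at hdescA
      rwa [getD_take_eq _ m K (by omega) (by omega), getD_take_eq _ m (K+1) (by omega) (by omega)] at hdescA
    have hK2l : K + 2 < l.length := by omega
    -- B's brute force over all removal positions, over Nat indices
    have hBany : (PySem.List.pyRange 0 ((l.length : Nat) : Int) 1).any (fun k => removalOkB l k)
        = (List.range l.length).any (fun k => remOkP l k) := by
      rw [PySem.List.pyRange_zero_natCast, List.any_map]
      congr 1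
      funext k
      exact removalOkB_natCast l k
    rw [hBany, hiK]
    show (if checkA ((K : Nat) : Int) l = true then true
          else if checkA (((K : Nat) : Int) + 1) l = true then true
          else if checkA (((K : Nat) : Int) + 2) l = true then true else false)
        = (List.range l.length).any (fun k => remOkP l k)
    rw [show (((K : Nat) : Int) + 1) = ((K + 1 : Nat) : Int) by push_cast; ring,
      show (((K : Nat) : Int) + 2) = ((K + 2 : Nat) : Int) by push_cast; ring,
      checkA_eq l K, checkA_eq l (K+1), checkA_eq l (K+2)]
    -- compare the three-candidate chain with the exhaustive scan
    by_cases hr : remOkP l K = true ∨ remOkP l (K+1) = true ∨ remOkP l (K+2) = true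
    · have hRHS : (List.range l.length).any (fun k => remOkP l k) = true := by
        rw [List.any_eq_true]
        rcases hr with h | h | h
        · exact ⟨K, List.mem_range.2 (by omega), h⟩
        · exact ⟨K+1, List.mem_range.2 (by omega), h⟩
        · exact ⟨K+2, List.mem_range.2 (by omega), h⟩
      rw [hRHS]
      rcases hr with h | h | h <;> simp [h]
    · have hr0' : remOkP l K = false := by
        cases h : remOkP l K with
        | false => rfl
        | true => exact absurd (Or.inl h) hr
      have hr1' : remOkP l (K+1) = false := by
        cases h : remOkP l (K+1) with
        | false => rfl
        | true => exact absurd (Or.inr (Or.inl h)) hr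
      have hr2' : remOkP l (K+2) = false := by
        cases h : remOkP l (K+2) with
        | false => rfl
        | true => exact absurd (Or.inr (Or.inr h)) hr
      have hRHS : (List.range l.length).any (fun k => remOkP l k) = false := by
        rw [List.any_eq_false]
        intro k hkmem
        have hkl : k < l.length := List.mem_range.1 hkmem
        by_cases e0 : k = K
        · rw [e0]; simp [hr0']
        · by_cases e1 : k = K + 1
          · rw [e1]; simp [hr1']
          · by_cases e2 : k = K + 2
            · rw [e2]; simp [hr2']
            · simp [descent_survive l K k hkl hK2l e0 e1 e2 hdesc]
      rw [hRHS, hr0', hr1', hr2']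
      simp
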